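-- pv_equiv track=rewrite | github.com/lenoirgn/MyBegginerWorkPython | lettre_postale.py | nb_max_0
-- ===== SOURCE A (Python) =====
-- def nb_max_0(iban:str) ->str:
--     """ Renvoie le nombre max de 0 consecutif
--
--     Précondition :
--     Exemple(s) :
--     $$$ nb_max_0('FR1430001019010000Z67067032')
--     4
--     """
--     maxi=1
--     comp=0
--     for carac in iban:
--         if carac=='0':
--             comp+=1
--             if maxi<comp:
--                 maxi=comp
--         else:
--             comp=0
--     return maxi
-- ===== SOURCE B (Python) =====
-- def nb_max_0(iban: str) -> int:
--     """Longest run of consecutive '0' characters, floored at 1 (as in the original)."""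
--     n = 0
--     while '0' * (n + 1) in iban:
--         n += 1
--     return max(1, n)
-- ===== Notes on version B (the rewrite author's own statement) =====
-- stated objective: simpler
-- what changed: Replaces the inline running-counter/maximum scan with substring probing: repeatedly test whether a zero-run one longer than the current best occurs as a substring, so the answer is the largest n whose zero-run of length n is a substring, floored at 1; the membership test runs in C, so it measured faster despite the worse worst case.
import Mathlib
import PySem

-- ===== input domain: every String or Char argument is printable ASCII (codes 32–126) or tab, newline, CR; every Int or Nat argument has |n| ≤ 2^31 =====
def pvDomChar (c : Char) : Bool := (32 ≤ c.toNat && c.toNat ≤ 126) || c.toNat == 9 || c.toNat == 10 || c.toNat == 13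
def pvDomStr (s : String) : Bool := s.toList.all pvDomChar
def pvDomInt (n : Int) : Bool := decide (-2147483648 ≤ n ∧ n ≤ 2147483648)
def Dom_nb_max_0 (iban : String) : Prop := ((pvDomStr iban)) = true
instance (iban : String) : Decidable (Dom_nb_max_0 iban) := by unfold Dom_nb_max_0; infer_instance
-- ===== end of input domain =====

-- B replaces A's running-counter scan by substring probing ('0'*(n+1) in iban); simpler, not faster.

-- ===== PORT A =====
-- literal port of A: fold over the characters with state (maxi, comp), starting at (1, 0)
def nb_max_0 (iban : String) : Int :=
  (iban.toList.foldl
    (fun (st : Int × Int) (carac : Char) =>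
      if carac = '0' then
        (if st.1 < st.2 + 1 then st.2 + 1 else st.1, st.2 + 1)
      else (st.1, 0)) (1, 0)).1

-- ===== PORT B =====
-- the `while '0' * (n + 1) in iban: n += 1` loop; terminates because an all-zero
-- substring is never longer than the string
def nbLoop (s : List Char) (n : Nat) : Nat :=
  if h : PySem.Chars.isIn (List.replicate (n + 1) '0') s = true then
    nbLoop s (n + 1)
  else n
termination_by s.length + 1 - n
decreasing_by
  have h2 := ((PySem.Chars.isIn_iff_infix _ _).mp h).length_le
  simp only [List.length_replicate] at h2
  omega

def nb_max_0_alt (iban : String) : Int :=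
  max 1 ((nbLoop iban.toList 0 : Nat) : Int)

-- ===== PRECONDITION & SPEC =====
def Spec_nb_max_0 (iban : String) (out : Int) : Prop := out = nb_max_0_alt iban
instance (iban : String) (out : Int) : Decidable (Spec_nb_max_0 iban out) := by unfold Spec_nb_max_0; infer_instance

-- ===== CLAIM (what is proved, stated in full; the proofs are below) =====
def Claim_equal_nb_max_0 : Prop := ∀ (iban : String), Dom_nb_max_0 iban → Spec_nb_max_0 iban (nb_max_0 iban)

-- ===== LEMMAS AND PROOFS =====

-- spec function: eAux c l = longest run of '0' in (replicate c '0' ++ l)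
def eAux : Nat → List Char → Nat
  | c, [] => c
  | c, x :: t => if x = '0' then eAux (c + 1) t else max c (eAux 0 t)

theorem le_eAux (l : List Char) : ∀ c : Nat, c ≤ eAux c l := by
  induction l with
  | nil => intro c; simp [eAux]
  | cons x t ih =>
    intro c
    by_cases hx : x = '0'
    · simpa [eAux, hx] using Nat.le_trans (Nat.le_succ c) (ih (c + 1))
    · simp [eAux, hx]

-- positional characterisation of an all-zero infix
theorem zp_infix (l : List Char) (k : Nat) :
    List.replicate k '0' <:+: l ↔ ∃ i, i + k ≤ l.length ∧ ∀ j < k, l[i+j]? = some '0' := by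
  constructor
  · rintro ⟨s, t, rfl⟩
    refine ⟨s.length, by simp, ?_⟩
    intro j hj
    rw [List.append_assoc, List.getElem?_append_right (by omega)]
    simp only [Nat.add_sub_cancel_left]
    rw [List.getElem?_append_left (by simpa using hj)]
    simp [hj]
  · rintro ⟨i, hlen, hget⟩
    have heq : List.replicate k '0' = (l.drop i).take k := by
      apply List.ext_getElem?
      intro m
      by_cases hm : m < k
      · rw [List.getElem?_replicate, if_pos hm, List.getElem?_take, if_pos hm,
          List.getElem?_drop]
        exact (hget m hm).symm
      · rw [List.getElem?_replicate, if_neg hm, List.getElem?_take, if_neg hm]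
    rw [heq]
    exact ((List.take_prefix _ _).isInfix).trans ((List.drop_suffix _ _).isInfix)

-- G-a: the maximal run really occurs
theorem eAux_infix (l : List Char) : ∀ c : Nat,
    List.replicate (eAux c l) '0' <:+: (List.replicate c '0' ++ l) := by
  induction l with
  | nil =>
    intro c
    simp only [eAux, List.append_nil]
    exact List.infix_rfl
  | cons x t ih =>
    intro c
    by_cases hx : x = '0'
    · subst hx
      have hl : List.replicate c '0' ++ '0' :: t = List.replicate (c + 1) '0' ++ t := by
        rw [List.replicate_succ', List.append_assoc]; rfl
      rw [show eAux c ('0' :: t) = eAux (c + 1) t by simp [eAux], hl]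
      exact ih (c + 1)
    · rw [show eAux c (x :: t) = max c (eAux 0 t) by simp [eAux, hx]]
      rcases Nat.le_total (eAux 0 t) c with hc | hc
      · rw [Nat.max_eq_left hc]
        exact (List.prefix_append _ _).isInfix
      · rw [Nat.max_eq_right hc]
        have h1 : List.replicate (eAux 0 t) '0' <:+: t := by simpa using ih 0
        exact h1.trans ((List.suffix_cons x t).trans (List.suffix_append _ _)).isInfix

-- G-b: no longer all-zero run occurs
theorem infix_le_eAux (l : List Char) : ∀ c k : Nat,
    List.replicate k '0' <:+: (List.replicate c '0' ++ l) → k ≤ eAux c l := by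
  induction l with
  | nil =>
    intro c k h
    have h2 := h.length_le
    simp at h2
    simpa [eAux] using h2
  | cons x t ih =>
    intro c k h
    by_cases hx : x = '0'
    · subst hx
      have hl : List.replicate c '0' ++ '0' :: t = List.replicate (c + 1) '0' ++ t := by
        rw [List.replicate_succ', List.append_assoc]; rfl
      rw [hl] at h
      simpa [eAux] using ih (c + 1) k h
    · rw [show eAux c (x :: t) = max c (eAux 0 t) by simp [eAux, hx]]
      obtain ⟨i, hlen, hget⟩ := (zp_infix _ k).mp h
      simp only [List.length_append, List.length_replicate, List.length_cons] at hlen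
      by_cases h1 : i + k ≤ c
      · exact le_trans (by omega) (le_max_left c (eAux 0 t))
      by_cases h2 : c < i
      · have hzp : ∃ i', i' + k ≤ t.length ∧ ∀ j < k, t[i'+j]? = some '0' := by
          refine ⟨i - c - 1, by omega, ?_⟩
          intro j hj
          have hg := hget j hj
          rw [List.getElem?_append_right (by simp only [List.length_replicate]; omega)] at hg
          simp only [List.length_replicate] at hg
          have hidx : i + j - c = (i - c - 1 + j) + 1 := by omega
          rw [hidx, List.getElem?_cons_succ] at hg
          exact hg
        have h3 : k ≤ eAux 0 t := ih 0 k (by simpa using (zp_infix t k).mpr hzp)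
        exact le_trans h3 (le_max_right c (eAux 0 t))
      · exfalso
        have hg := hget (c - i) (by omega)
        have hidx : i + (c - i) = c := by omega
        rw [hidx, List.getElem?_append_right (by simp)] at hg
        simp at hg
        exact hx hg

theorem isIn_rep_iff (l : List Char) (k : Nat) :
    PySem.Chars.isIn (List.replicate k '0') l = true ↔ k ≤ eAux 0 l := by
  rw [PySem.Chars.isIn_iff_infix]
  constructor
  · intro h
    have := infix_le_eAux l 0 k (by simpa using h)
    simpa using this
  · intro h
    have hM : List.replicate (eAux 0 l) '0' <:+: l := by simpa using eAux_infix l 0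
    have hp : List.replicate k '0' <+: List.replicate (eAux 0 l) '0' :=
      ⟨List.replicate (eAux 0 l - k) '0', by rw [← List.replicate_add]; congr 1; omega⟩
    exact hp.isInfix.trans hM

theorem nbLoop_eq (l : List Char) : ∀ n, n ≤ eAux 0 l → nbLoop l n = eAux 0 l := by
  have key : ∀ d n, eAux 0 l - n ≤ d → n ≤ eAux 0 l → nbLoop l n = eAux 0 l := by
    intro d
    induction d with
    | zero =>
      intro n h1 h2
      rw [nbLoop, dif_neg]
      · omega
      · intro hc
        have := (isIn_rep_iff l (n + 1)).mp hc
        omega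
    | succ d ih =>
      intro n h1 h2
      by_cases hn : n = eAux 0 l
      · rw [nbLoop, dif_neg]
        · exact hn
        · intro hc
          have := (isIn_rep_iff l (n + 1)).mp hc
          omega
      · rw [nbLoop, dif_pos ((isIn_rep_iff l (n + 1)).mpr (by omega))]
        exact ih (n + 1) (by omega) (by omega)
  intro n hn
  exact key (eAux 0 l - n) n le_rfl hn

theorem foldA (l : List Char) : ∀ (m : Int) (c : Nat), (c : Int) ≤ m →
    (l.foldl
      (fun (st : Int × Int) (carac : Char) =>
        if carac = '0' then
          (if st.1 < st.2 + 1 then st.2 + 1 else st.1, st.2 + 1)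
        else (st.1, 0)) (m, (c : Int))).1 = max m ((eAux c l : Nat) : Int) := by
  induction l with
  | nil =>
    intro m c h
    simp [eAux, max_eq_left h]
  | cons x t ih =>
    intro m c h
    by_cases hx : x = '0'
    · simp only [List.foldl_cons, hx, if_true]
      have hstep : (if m < (c : Int) + 1 then (c : Int) + 1 else m) = max m ((c : Int) + 1) := by
        split_ifs with h' <;> [exact (max_eq_right (by omega)).symm; exact (max_eq_left (by omega)).symm]
      have hcast : ((c : Int) + 1) = (((c + 1 : Nat) : Int)) := by push_cast; ring
      rw [hstep, hcast]
      rw [ih (max m ((c + 1 : Nat) : Int)) (c + 1) (le_max_right _ _)]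
      have hle : (((c + 1 : Nat) : Int)) ≤ ((eAux (c + 1) t : Nat) : Int) := by
        exact_mod_cast le_eAux t (c + 1)
      rw [max_assoc, max_eq_right hle]
      simp [eAux]
    · simp only [List.foldl_cons, if_neg hx]
      have h2 := ih m 0 (le_trans (by positivity) h)
      simp only [Nat.cast_zero] at h2
      rw [h2]
      have : eAux c (x :: t) = max c (eAux 0 t) := by simp [eAux, hx]
      rw [this]
      push_cast [Nat.cast_max]
      rw [← max_assoc, max_eq_left h]

-- ===== VERDICT (by name: the statement is the Claim_ definition above) =====
theorem nb_max_0_spec : Claim_equal_nb_max_0 := by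
  intro iban _
  unfold Spec_nb_max_0 nb_max_0 nb_max_0_alt
  rw [nbLoop_eq iban.toList 0 (Nat.zero_le _)]
  have h := foldA iban.toList 1 0 (by norm_num)
  simpa using h
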